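-- pv_equiv track=rewrite | github.com/SamGrayson/aoc2022 | Day 14/main_pt1.py | create_sand_points
-- ===== SOURCE A (Python) =====
-- def create_sand_points(coordinates, matrix, last_row, points=0):
--     air = "."
--     rock = "#"
--     sand = "o"
--     new_coordinates = []
--     # If the space below the coordinates is sand, we need to move the sand down a level.
--     if matrix[coordinates[0] + 1][coordinates[1]] == air:
--         new_coordinates = [coordinates[0] + 1, coordinates[1]]
--     # If the space diagonally left is air, move the sand that way
--     elif matrix[coordinates[0] + 1][coordinates[1] - 1] == air:
--         new_coordinates = [coordinates[0] + 1, coordinates[1] - 1]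
--     # If the space diagonally right is air, move the sand that way
--     elif matrix[coordinates[0] + 1][coordinates[1] + 1] == air:
--         new_coordinates = [coordinates[0] + 1, coordinates[1] + 1]
--     # If none of the spaces around are air, we need to go up 1 level.
--     else:
--         matrix[coordinates[0]][coordinates[1]] = sand
--         points += 1
--         return (points, False)
--
--     # we're done!
--     if new_coordinates[0] == last_row:
--         return (points, True)
--
--     return create_sand_points(new_coordinates, matrix, last_row, points)
-- ===== SOURCE B (Python) =====
-- def create_sand_points(coordinates, matrix, last_row, points=0):
--     # Iterative drop: keep the falling grain's position in locals instead of recursing.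
--     air = "."
--     r, c = coordinates[0], coordinates[1]
--     while True:
--         row = matrix[r + 1]
--         nc = next((x for x in (c, c - 1, c + 1) if row[x] == air), None)
--         if nc is None:
--             matrix[r][c] = "o"
--             return (points + 1, False)
--         if r + 1 == last_row:
--             return (points, True)
--         r, c = r + 1, nc
-- ===== Notes on version B (the rewrite author's own statement) =====
-- stated objective: simpler
-- what changed: A's tail recursion (which allocates a fresh coordinate list per step and re-indexes matrix[row+1] in every branch) is replaced by an iterative while-loop keeping the position in two locals, fetching the row below once per iteration and choosing the next column as the first air cell among [c, c-1, c+1].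
import Mathlib
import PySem

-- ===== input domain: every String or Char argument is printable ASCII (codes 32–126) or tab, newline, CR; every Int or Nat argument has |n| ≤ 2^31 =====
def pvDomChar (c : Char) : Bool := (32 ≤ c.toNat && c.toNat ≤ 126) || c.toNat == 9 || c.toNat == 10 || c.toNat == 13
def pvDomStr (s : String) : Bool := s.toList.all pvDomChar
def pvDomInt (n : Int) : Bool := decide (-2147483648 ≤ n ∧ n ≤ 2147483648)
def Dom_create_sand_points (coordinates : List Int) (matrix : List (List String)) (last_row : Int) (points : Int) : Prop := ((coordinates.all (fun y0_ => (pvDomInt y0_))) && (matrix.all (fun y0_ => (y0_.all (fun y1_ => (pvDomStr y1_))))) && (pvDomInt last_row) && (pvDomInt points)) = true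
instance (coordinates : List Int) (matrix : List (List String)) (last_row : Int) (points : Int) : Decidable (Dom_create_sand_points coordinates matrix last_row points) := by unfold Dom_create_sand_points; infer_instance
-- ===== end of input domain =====

-- B replaces A's tail recursion (which allocates a fresh coordinate list per step) by an
-- iterative loop over the current position that fetches the row below once and picks the first
-- air cell among [col, col-1, col+1]; equivalence is about the RETURN value (both Pythons also
-- perform the same single matrix write when the grain settles).

-- ===== PORT A =====
-- matrix[i][j] as A reads it (Python indexing, negative wraparound; none = IndexError)
def pvCellA (matrix : List (List String)) (i j : Int) : Option String :=
  (PySem.List.pyGet? matrix i).bind (fun row => PySem.List.pyGet? row j)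

-- A's tail recursion; the Nat step budget only makes it total (a non-raising run moves down one
-- row per call, so within Pre_ it never runs out — proved below)
def pvGoA (matrix : List (List String)) (last_row : Int) : Nat → List Int → Int → Int × Bool
  | 0, _, points => (points, false)
  | n+1, coordinates, points =>
    let r := (PySem.List.pyGet? coordinates 0).getD 0
    let c := (PySem.List.pyGet? coordinates 1).getD 0
    let new_coordinates : Option (List Int) :=
      if pvCellA matrix (r+1) c = some "." then some [r+1, c]
      else if pvCellA matrix (r+1) (c-1) = some "." then some [r+1, c-1]
      else if pvCellA matrix (r+1) (c+1) = some "." then some [r+1, c+1]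
      else none
    match new_coordinates with
    | none => (points + 1, false)          -- matrix[r][c] = "o" (mutation; return value unaffected)
    | some nc =>
      if (PySem.List.pyGet? nc 0).getD 0 = last_row then (points, true)
      else pvGoA matrix last_row n nc points

def create_sand_points (coordinates : List Int) (matrix : List (List String)) (last_row : Int) (points : Int) : Int × Bool :=
  pvGoA matrix last_row (2 * matrix.length + 2) coordinates points

-- ===== PORT B =====
-- B's while-loop: position in two locals, the row below fetched once per iteration,
-- next column = first air cell among [c, c-1, c+1]
def pvGoB (matrix : List (List String)) (last_row : Int) : Nat → Int → Int → Int → Int × Bool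
  | 0, _, _, points => (points, false)
  | n+1, r, c, points =>
    match PySem.List.pyGet? matrix (r+1) with
    | none => (points, false)
    | some row =>
      match [c, c-1, c+1].find? (fun x => PySem.List.pyGet? row x == some ".") with
      | none => (points + 1, false)        -- matrix[r][c] = "o" (mutation; return value unaffected)
      | some nc => if r + 1 = last_row then (points, true)
                   else pvGoB matrix last_row n (r+1) nc points

def create_sand_points_alt (coordinates : List Int) (matrix : List (List String)) (last_row : Int) (points : Int) : Int × Bool :=
  match PySem.List.pyGet? coordinates 0, PySem.List.pyGet? coordinates 1 with
  | some r, some c => pvGoB matrix last_row (2 * matrix.length + 2) r c points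
  | _, _ => (points, false)

-- ===== PRECONDITION & SPEC =====
-- Pre_ excludes exactly the inputs on which A raises an IndexError (and nothing else): a
-- coordinate list shorter than 2, or a fall that touches a row or column index outside Python's
-- negative-wraparound range; which cells the fall touches depends on the grid contents, so the
-- index-validity condition is stated row by row down the fall (a non-raising fall descends one
-- row per step, hence visits at most 2·|matrix|+2 rows — the fixed recursion bound below).
def pvFallOk (matrix : List (List String)) (last_row : Int) : Nat → Int → Int → Bool
  | 0, _, _ => false
  | n+1, r, c =>
    match PySem.List.pyGet? matrix (r+1) with
    | none => false
    | some row =>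
      let ok : Int → Bool := fun i => decide (-(row.length : Int) ≤ i ∧ i < (row.length : Int))
      let cont : Int → Bool := fun nc => (r+1 == last_row) || pvFallOk matrix last_row n (r+1) nc
      ok c &&
        (if PySem.List.pyGet? row c = some "." then cont c
         else ok (c-1) &&
           (if PySem.List.pyGet? row (c-1) = some "." then cont (c-1)
            else ok (c+1) &&
              (if PySem.List.pyGet? row (c+1) = some "." then cont (c+1)
               else decide (-(matrix.length : Int) ≤ r ∧ r < (matrix.length : Int)) &&
                 decide (-((PySem.List.pyGetD matrix r []).length : Int) ≤ c ∧
                          c < ((PySem.List.pyGetD matrix r []).length : Int)))))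

def Pre_create_sand_points (coordinates : List Int) (matrix : List (List String)) (last_row : Int) (_points : Int) : Prop :=
  2 ≤ coordinates.length ∧
  pvFallOk matrix last_row (2 * matrix.length + 2) (coordinates.getD 0 0) (coordinates.getD 1 0) = true
instance (coordinates : List Int) (matrix : List (List String)) (last_row : Int) (points : Int) : Decidable (Pre_create_sand_points coordinates matrix last_row points) := by unfold Pre_create_sand_points; infer_instance

def pvWitness_create_sand_points : List Int × List (List String) × Int × Int :=
  ([0, 2], [[".", ".", ".", ".", "."], [".", ".", ".", ".", "."], ["#", "#", "#", "#", "#"]], 2, 0)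

def Spec_create_sand_points (coordinates : List Int) (matrix : List (List String)) (last_row : Int) (points : Int) (out : Int × Bool) : Prop := out = create_sand_points_alt coordinates matrix last_row points
instance (coordinates : List Int) (matrix : List (List String)) (last_row : Int) (points : Int) (out : Int × Bool) : Decidable (Spec_create_sand_points coordinates matrix last_row points out) := by unfold Spec_create_sand_points; infer_instance

-- ===== CLAIM (what is proved, stated in full; the proofs are below) =====
def Claim_equal_create_sand_points : Prop := ∀ (coordinates : List Int) (matrix : List (List String)) (last_row : Int) (points : Int), Dom_create_sand_points coordinates matrix last_row points → Pre_create_sand_points coordinates matrix last_row points → Spec_create_sand_points coordinates matrix last_row points (create_sand_points coordinates matrix last_row points)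

-- ===== LEMMAS AND PROOFS =====

-- Safety invariant used by the equivalence: along the run, every row the grain looks at exists
-- (this is the only point where the two ports' out-of-domain defaults could differ)
def pvSafe (matrix : List (List String)) (last_row : Int) : Nat → Int → Int → Prop
  | 0, _, _ => True
  | n+1, r, c =>
    ∃ row, PySem.List.pyGet? matrix (r+1) = some row ∧
      ∀ nc, [c, c-1, c+1].find? (fun x => PySem.List.pyGet? row x == some ".") = some nc →
        r + 1 ≠ last_row → pvSafe matrix last_row n (r+1) nc

theorem pvGoA_eq_goB (matrix : List (List String)) (last_row : Int) :
    ∀ (n : Nat) (coords : List Int) (r c p : Int),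
      PySem.List.pyGet? coords 0 = some r → PySem.List.pyGet? coords 1 = some c →
      pvSafe matrix last_row n r c →
      pvGoA matrix last_row n coords p = pvGoB matrix last_row n r c p := by
  intro n
  induction n with
  | zero => intro coords r c p h0 h1 _; rfl
  | succ n ih =>
    intro coords r c p h0 h1 hsafe
    obtain ⟨row, hrow, hrec⟩ := hsafe
    have hx0c : ∀ (a b : Int), PySem.List.pyGet? [a, b] 0 = some a := fun a b => by
      simp [PySem.List.pyGet?, PySem.List.pyIdx?]
    have hx1c : ∀ (a b : Int), PySem.List.pyGet? [a, b] 1 = some b := fun a b => by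
      simp [PySem.List.pyGet?, PySem.List.pyIdx?]
    simp only [pvGoA, pvGoB, h0, h1, Option.getD_some, hrow, pvCellA, Option.bind_some]
    by_cases hc : PySem.List.pyGet? row c = some "."
    · rw [if_pos hc]
      have hf : [c, c - 1, c + 1].find? (fun x => PySem.List.pyGet? row x == some ".") = some c := by
        simp [List.find?, hc]
      simp only [hf, hx0c, Option.getD_some]
      by_cases hlr : r + 1 = last_row
      · rw [if_pos hlr, if_pos hlr]
      · rw [if_neg hlr, if_neg hlr]
        exact ih [r + 1, c] (r + 1) c p (hx0c _ _) (hx1c _ _) (hrec c hf hlr)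
    · rw [if_neg hc]
      by_cases hc1 : PySem.List.pyGet? row (c - 1) = some "."
      · rw [if_pos hc1]
        have hf : [c, c - 1, c + 1].find? (fun x => PySem.List.pyGet? row x == some ".") = some (c - 1) := by
          simp [List.find?, beq_eq_decide, hc, hc1]
        simp only [hf, hx0c, Option.getD_some]
        by_cases hlr : r + 1 = last_row
        · rw [if_pos hlr, if_pos hlr]
        · rw [if_neg hlr, if_neg hlr]
          exact ih [r + 1, c - 1] (r + 1) (c - 1) p (hx0c _ _) (hx1c _ _) (hrec (c - 1) hf hlr)
      · rw [if_neg hc1]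
        by_cases hc2 : PySem.List.pyGet? row (c + 1) = some "."
        · rw [if_pos hc2]
          have hf : [c, c - 1, c + 1].find? (fun x => PySem.List.pyGet? row x == some ".") = some (c + 1) := by
            simp [List.find?, beq_eq_decide, hc, hc1, hc2]
          simp only [hf, hx0c, Option.getD_some]
          by_cases hlr : r + 1 = last_row
          · rw [if_pos hlr, if_pos hlr]
          · rw [if_neg hlr, if_neg hlr]
            exact ih [r + 1, c + 1] (r + 1) (c + 1) p (hx0c _ _) (hx1c _ _) (hrec (c + 1) hf hlr)
        · rw [if_neg hc2]
          have hf : [c, c - 1, c + 1].find? (fun x => PySem.List.pyGet? row x == some ".") = none := by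
            simp [List.find?, beq_eq_decide, hc, hc1, hc2]
          simp only [hf]

theorem pvFallOk_safe (matrix : List (List String)) (last_row : Int) :
    ∀ (n : Nat) (r c : Int), pvFallOk matrix last_row n r c = true →
      pvSafe matrix last_row n r c := by
  intro n
  induction n with
  | zero => intro r c _; trivial
  | succ n ih =>
    intro r c h
    simp only [pvFallOk] at h
    cases hrow : PySem.List.pyGet? matrix (r+1) with
    | none => rw [hrow] at h; cases h
    | some row =>
      rw [hrow] at h
      refine ⟨row, hrow, ?_⟩
      intro nc hfind hne
      simp only [Bool.and_eq_true] at h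
      obtain ⟨-, h⟩ := h
      by_cases hc : PySem.List.pyGet? row c = some "."
      · rw [if_pos hc] at h
        rw [show [c, c - 1, c + 1].find? (fun x => PySem.List.pyGet? row x == some ".") = some c by
          simp [List.find?, hc]] at hfind
        cases hfind
        simp only [Bool.or_eq_true, beq_iff_eq] at h
        rcases h with h | h
        · exact absurd h hne
        · exact ih _ _ h
      · rw [if_neg hc] at h
        by_cases hc1 : PySem.List.pyGet? row (c - 1) = some "."
        · rw [if_pos hc1] at h
          rw [show [c, c - 1, c + 1].find? (fun x => PySem.List.pyGet? row x == some ".") = some (c - 1) by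
            simp [List.find?, beq_eq_decide, hc, hc1]] at hfind
          cases hfind
          simp only [Bool.and_eq_true, Bool.or_eq_true, beq_iff_eq] at h
          rcases h.2 with h | h
          · exact absurd h hne
          · exact ih _ _ h
        · rw [if_neg hc1] at h
          by_cases hc2 : PySem.List.pyGet? row (c + 1) = some "."
          · rw [if_pos hc2] at h
            rw [show [c, c - 1, c + 1].find? (fun x => PySem.List.pyGet? row x == some ".") = some (c + 1) by
              simp [List.find?, beq_eq_decide, hc, hc1, hc2]] at hfind
            cases hfind
            simp only [Bool.and_eq_true, Bool.or_eq_true, beq_iff_eq] at h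
            rcases h.2.2 with h | h
            · exact absurd h hne
            · exact ih _ _ h
          · rw [if_neg hc2] at h
            rw [show [c, c - 1, c + 1].find? (fun x => PySem.List.pyGet? row x == some ".") = none by
              simp [List.find?, beq_eq_decide, hc, hc1, hc2]] at hfind
            cases hfind

-- ===== VERDICT (by name: the statement is the Claim_ definition above) =====
theorem create_sand_points_spec : Claim_equal_create_sand_points := by
  intro coords matrix last_row points _ hpre
  obtain ⟨hlen, hfall⟩ := hpre
  match coords, hlen with
  | a :: b :: t, _ =>
    have h0 : PySem.List.pyGet? (a :: b :: t) 0 = some a := PySem.List.pyGet?_zero_cons a (b :: t)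
    have h1 : PySem.List.pyGet? (a :: b :: t) 1 = some b := by
      rw [show (1 : Int) = ((1 : Nat) : Int) by simp, PySem.List.pyGet?_natCast]
      simp
    show _ = create_sand_points_alt (a :: b :: t) matrix last_row points
    unfold create_sand_points create_sand_points_alt
    simp only [h0, h1]
    simp only [List.getD_cons_zero, List.getD_cons_succ] at hfall
    exact pvGoA_eq_goB matrix last_row (2 * matrix.length + 2) (a :: b :: t) a b points h0 h1
      (pvFallOk_safe matrix last_row (2 * matrix.length + 2) a b hfall)
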